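-- pv_equiv track=rewrite | github.com/ivleneb/batchQantufarmaSusii | reporteAlmacen/models/WarehouseMovementFactory.py | determineMovementType
-- ===== SOURCE A (Python) =====
-- from typing import Dict, Any, Optional, Type
--
-- def determineMovementType(movement_data: Dict[str, Any])->str:
--     typ = ''
--     if 'observations' in movement_data:
--         obser = movement_data['observations']
--
--         if obser != None:
--             obser=obser.upper()
--
--             if 'USO INTERNO' in obser:
--                 typ = 'INTERNAL_USE'
--             elif 'TRASLADO' in obser:
--                 typ = 'TRANSFER'
--             elif all(palabra in obser for palabra in ['PRODUCTO', 'MOTIVO', 'CANTIDAD', 'MONTO']):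
--                 typ = 'ADJUST'
--             elif 'VENCIDO' in obser:
--                 typ = 'EXPIRED'
--             else:
--                 typ = 'NO_TYPE'
--         else:
--             typ = 'NO_TYPE'
--     else:
--         typ = 'INVALID'
--
--     return typ
-- ===== SOURCE B (Python) =====
-- _KEYWORDS = ('USO INTERNO', 'TRASLADO', 'PRODUCTO', 'MOTIVO', 'CANTIDAD', 'MONTO', 'VENCIDO')
--
-- def determineMovementType(movement_data):
--     try:
--         obser = movement_data['observations']
--     except KeyError:
--         return 'INVALID'
--     if obser is None:
--         return 'NO_TYPE'
--     u = obser.upper()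
--     # single left-to-right scan: collect every keyword that starts at some position
--     found = set()
--     for i in range(len(u)):
--         for kw in _KEYWORDS:
--             if u.startswith(kw, i):
--                 found.add(kw)
--     if 'USO INTERNO' in found:
--         return 'INTERNAL_USE'
--     if 'TRASLADO' in found:
--         return 'TRANSFER'
--     if 'PRODUCTO' in found and 'MOTIVO' in found and 'CANTIDAD' in found and 'MONTO' in found:
--         return 'ADJUST'
--     if 'VENCIDO' in found:
--         return 'EXPIRED'
--     return 'NO_TYPE'
-- ===== Notes on version B (the rewrite author's own statement) =====
-- stated objective: alternative
-- what changed: Instead of A's if/elif chain of six independent substring ('in') searches, B makes one left-to-right scan of the uppercased text, collecting into a set every keyword that starts at each position, and then maps the found-set to the label (priority decision over precomputed matches).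
import Mathlib
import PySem

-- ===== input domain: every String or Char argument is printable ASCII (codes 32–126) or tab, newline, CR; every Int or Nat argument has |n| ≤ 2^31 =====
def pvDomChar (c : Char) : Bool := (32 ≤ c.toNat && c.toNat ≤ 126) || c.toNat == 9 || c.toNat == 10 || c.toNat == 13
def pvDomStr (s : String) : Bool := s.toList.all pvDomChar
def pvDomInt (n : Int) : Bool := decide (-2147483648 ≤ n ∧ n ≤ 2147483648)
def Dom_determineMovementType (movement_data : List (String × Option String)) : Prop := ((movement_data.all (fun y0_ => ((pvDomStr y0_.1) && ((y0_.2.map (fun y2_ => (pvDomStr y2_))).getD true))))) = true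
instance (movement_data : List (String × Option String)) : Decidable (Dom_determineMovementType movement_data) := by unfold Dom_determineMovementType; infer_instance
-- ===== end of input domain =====

-- B replaces A's six independent substring searches (if/elif chain of 'in' tests) by ONE left-to-right
-- scan of the uppercased text that collects every keyword starting at each position into a set, then a
-- decision stage over that found-set (objective: alternative algorithm, same asymptotic cost).


-- ===== PORT A =====
-- literal port of A's if/elif chain of substring tests
def determineMovementType (movement_data : List (String × Option String)) : String :=
  match (PySem.Dict.ofList movement_data).get? "observations" with
  | none => "INVALID"
  | some none => "NO_TYPE"
  | some (some o) =>
    let obser := PySem.Str.upper o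
    if PySem.Str.isIn "USO INTERNO" obser then "INTERNAL_USE"
    else if PySem.Str.isIn "TRASLADO" obser then "TRANSFER"
    else if ["PRODUCTO", "MOTIVO", "CANTIDAD", "MONTO"].all (fun w => PySem.Str.isIn w obser) then "ADJUST"
    else if PySem.Str.isIn "VENCIDO" obser then "EXPIRED"
    else "NO_TYPE"

-- ===== PORT B =====
-- port of Source B's _KEYWORDS tuple
def movementKeywords : List String :=
  ["USO INTERNO", "TRASLADO", "PRODUCTO", "MOTIVO", "CANTIDAD", "MONTO", "VENCIDO"]

-- inner loop body of Source B's scan at position i: u.startswith(kw, i) with 0 ≤ i is exactly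
-- kw being a list-prefix of u.drop i (hand-ported; exact since i comes from range(len(u)))
def scanStep (u : List Char) (found : PySem.Set String) (i : Nat) : PySem.Set String :=
  movementKeywords.foldl
    (fun f kw => if kw.toList.isPrefixOf (u.drop i) then PySem.Set.add f kw else f) found

def determineMovementType_alt (movement_data : List (String × Option String)) : String :=
  match (PySem.Dict.ofList movement_data).get? "observations" with
  | none => "INVALID"
  | some none => "NO_TYPE"
  | some (some o) =>
    let u := (PySem.Str.upper o).toList
    let found := (List.range u.length).foldl (scanStep u) PySem.Set.empty
    if PySem.Set.contains found "USO INTERNO" then "INTERNAL_USE"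
    else if PySem.Set.contains found "TRASLADO" then "TRANSFER"
    else if PySem.Set.contains found "PRODUCTO" && PySem.Set.contains found "MOTIVO" &&
            PySem.Set.contains found "CANTIDAD" && PySem.Set.contains found "MONTO" then "ADJUST"
    else if PySem.Set.contains found "VENCIDO" then "EXPIRED"
    else "NO_TYPE"

-- ===== PRECONDITION & SPEC =====
def Spec_determineMovementType (movement_data : List (String × Option String)) (out : String) : Prop := out = determineMovementType_alt movement_data
instance (movement_data : List (String × Option String)) (out : String) : Decidable (Spec_determineMovementType movement_data out) := by unfold Spec_determineMovementType; infer_instance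

-- ===== CLAIM (what is proved, stated in full; the proofs are below) =====
def Claim_equal_determineMovementType : Prop := ∀ (movement_data : List (String × Option String)), Dom_determineMovementType movement_data → Spec_determineMovementType movement_data (determineMovementType movement_data)

-- ===== LEMMAS AND PROOFS =====

-- membership after the inner keyword loop at one position
lemma mem_scanStep (u : List Char) (f : PySem.Set String) (i : Nat) (kw : String) :
    kw ∈ scanStep u f i ↔ kw ∈ f ∨ (kw ∈ movementKeywords ∧ kw.toList.isPrefixOf (u.drop i)) := by
  have gen : ∀ (kws : List String) (f : PySem.Set String),
      kw ∈ kws.foldl (fun f kw' => if kw'.toList.isPrefixOf (u.drop i) then PySem.Set.add f kw' else f) f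
        ↔ kw ∈ f ∨ (kw ∈ kws ∧ kw.toList.isPrefixOf (u.drop i)) := by
    intro kws
    induction kws with
    | nil => simp [List.foldl]
    | cons k t ih =>
      intro f
      simp only [List.foldl_cons]
      rw [ih]
      by_cases hp : k.toList.isPrefixOf (u.drop i) = true
      · simp only [hp, if_pos]
        rw [PySem.Set.mem_add]
        constructor
        · rintro ((h | rfl) | h)
          · exact Or.inl h
          · exact Or.inr ⟨List.mem_cons_self, hp⟩
          · exact Or.inr ⟨List.mem_cons_of_mem _ h.1, h.2⟩
        · rintro (h | ⟨hm, hq⟩)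
          · exact Or.inl (Or.inl h)
          · rcases List.mem_cons.mp hm with rfl | hm
            · exact Or.inl (Or.inr rfl)
            · exact Or.inr ⟨hm, hq⟩
      · simp only [hp, if_neg, Bool.false_eq_true, not_false_iff]
        constructor
        · rintro (h | h)
          · exact Or.inl h
          · exact Or.inr ⟨List.mem_cons_of_mem _ h.1, h.2⟩
        · rintro (h | ⟨hm, hq⟩)
          · exact Or.inl h
          · rcases List.mem_cons.mp hm with rfl | hm
            · exact absurd hq hp
            · exact Or.inr ⟨hm, hq⟩
  exact gen movementKeywords f

-- membership after the whole scan: kw found ⟺ kw is a keyword starting at some position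
lemma mem_scanFold (u : List Char) (idxs : List Nat) (init : PySem.Set String) (kw : String) :
    kw ∈ idxs.foldl (scanStep u) init ↔
      kw ∈ init ∨ (kw ∈ movementKeywords ∧ ∃ i ∈ idxs, kw.toList.isPrefixOf (u.drop i) = true) := by
  induction idxs generalizing init with
  | nil => simp [List.foldl]
  | cons j t ih =>
    simp only [List.foldl_cons]
    rw [ih, mem_scanStep]
    constructor
    · rintro ((h | ⟨hm, hp⟩) | ⟨hm, i, hi, hp⟩)
      · exact Or.inl h
      · exact Or.inr ⟨hm, j, List.mem_cons_self, hp⟩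
      · exact Or.inr ⟨hm, i, List.mem_cons_of_mem _ hi, hp⟩
    · rintro (h | ⟨hm, i, hi, hp⟩)
      · exact Or.inl (Or.inl h)
      · rcases List.mem_cons.mp hi with rfl | hi
        · exact Or.inl (Or.inr ⟨hm, hp⟩)
        · exact Or.inr ⟨hm, i, hi, hp⟩

-- a nonempty keyword is found by the scan iff it is a substring (Python 'in')
lemma contains_scan_iff_isIn (u : List Char) (kw : String)
    (hk : kw ∈ movementKeywords) (hne : kw.toList ≠ []) :
    PySem.Set.contains ((List.range u.length).foldl (scanStep u) PySem.Set.empty) kw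
      = PySem.Chars.isIn kw.toList u := by
  rcases h : PySem.Chars.isIn kw.toList u with _ | _
  · rw [PySem.Set.contains_eq_listContains]
    simp only [List.contains_eq_mem, decide_eq_false_iff_not]
    rw [mem_scanFold]
    rintro (h0 | ⟨-, i, -, hp⟩)
    · simp [PySem.Set.empty] at h0
    · have : ∃ j, kw.toList <+: u.drop j := ⟨i, List.isPrefixOf_iff_prefix.mp hp⟩
      rw [PySem.Chars.exists_prefix_drop_iff_isIn] at this
      simp [h] at this
  · have := (PySem.Chars.exists_prefix_drop_iff_isIn kw.toList u).mpr h
    rcases this with ⟨j, hj⟩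
    have hjlt : j < u.length := by
      by_contra hge
      rw [List.drop_eq_nil_of_le (Nat.le_of_not_lt hge)] at hj
      exact hne (List.prefix_nil.mp hj)
    rw [PySem.Set.contains_eq_listContains]
    simp only [List.contains_eq_mem, decide_eq_true_eq]
    rw [mem_scanFold]
    exact Or.inr ⟨hk, j, List.mem_range.mpr hjlt, List.isPrefixOf_iff_prefix.mpr hj⟩

-- ===== VERDICT (by name: the statement is the Claim_ definition above) =====
theorem determineMovementType_spec : Claim_equal_determineMovementType := by
  intro md _
  unfold Spec_determineMovementType determineMovementType determineMovementType_alt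
  cases h : (PySem.Dict.ofList md).get? "observations" with
  | none => rfl
  | some obser =>
    cases obser with
    | none => rfl
    | some o =>
      simp only
      rw [contains_scan_iff_isIn _ _ (by decide) (by decide),
          contains_scan_iff_isIn _ _ (by decide) (by decide),
          contains_scan_iff_isIn _ _ (by decide) (by decide),
          contains_scan_iff_isIn _ _ (by decide) (by decide),
          contains_scan_iff_isIn _ _ (by decide) (by decide),
          contains_scan_iff_isIn _ _ (by decide) (by decide),
          contains_scan_iff_isIn _ _ (by decide) (by decide)]
      simp [PySem.Str.isIn_eq, List.all, Bool.and_assoc]
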